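-- pv_equiv track=rewrite | github.com/weeksjc13/Code | 4140/Project Part 2/mychunker.py | tags_since_vbd
-- ===== SOURCE A (Python) =====
-- def tags_since_vbd(sentence, i):
--   tags = set()
--   for word, pos in sentence[:i]:
--     if (pos == 'VBD'):
--       tags = set()
--     else:
--       tags.add(pos)
--   return '+'.join(sorted(tags))
-- ===== SOURCE B (Python) =====
-- def tags_since_vbd(sentence, i):
--   tags = set()
--   for word, pos in reversed(sentence[:i]):
--     if pos == 'VBD':
--       break
--     tags.add(pos)
--   return '+'.join(sorted(tags))
-- ===== Notes on version B (the rewrite author's own statement) =====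
-- stated objective: simpler
-- what changed: B scans the prefix backwards and stops at the first VBD it meets, collecting tags directly, instead of A's full forward scan that resets the set at every VBD.
import Mathlib
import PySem

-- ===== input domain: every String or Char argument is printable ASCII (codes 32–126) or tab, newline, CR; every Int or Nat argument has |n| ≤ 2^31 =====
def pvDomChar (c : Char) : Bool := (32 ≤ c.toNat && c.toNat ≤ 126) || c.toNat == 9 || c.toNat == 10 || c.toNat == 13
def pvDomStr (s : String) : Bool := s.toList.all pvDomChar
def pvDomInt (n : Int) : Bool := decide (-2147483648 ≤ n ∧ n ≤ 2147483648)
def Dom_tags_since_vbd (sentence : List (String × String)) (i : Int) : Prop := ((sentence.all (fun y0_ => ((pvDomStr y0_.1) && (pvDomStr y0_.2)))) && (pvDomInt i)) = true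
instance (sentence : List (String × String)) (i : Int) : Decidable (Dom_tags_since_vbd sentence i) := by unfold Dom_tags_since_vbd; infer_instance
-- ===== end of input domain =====

-- B scans the prefix backwards, stopping at the first VBD it meets, instead of A's
-- forward scan that resets the set at every VBD; same return value (objective: simpler).

-- ===== PORT A =====
def tags_since_vbd (sentence : List (String × String)) (i : Int) : String :=
  let tags : PySem.Set String :=
    (PySem.List.slice sentence none (some i)).foldl
      (fun tags wp => if wp.2 == "VBD" then PySem.Set.empty else PySem.Set.add tags wp.2)
      PySem.Set.empty
  PySem.Str.join "+" (PySem.List.sorted tags (fun x => x) false)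

-- ===== PORT B =====
-- backward scan with break: structural recursion on the reversed prefix
def tsvBack : List (String × String) → PySem.Set String → PySem.Set String
  | [], tags => tags
  | wp :: rest, tags =>
      if wp.2 == "VBD" then tags else tsvBack rest (PySem.Set.add tags wp.2)

def tags_since_vbd_alt (sentence : List (String × String)) (i : Int) : String :=
  let tags : PySem.Set String :=
    tsvBack (PySem.List.slice sentence none (some i)).reverse PySem.Set.empty
  PySem.Str.join "+" (PySem.List.sorted tags (fun x => x) false)

-- ===== PRECONDITION & SPEC =====
def Spec_tags_since_vbd (sentence : List (String × String)) (i : Int) (out : String) : Prop := out = tags_since_vbd_alt sentence i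
instance (sentence : List (String × String)) (i : Int) (out : String) : Decidable (Spec_tags_since_vbd sentence i out) := by unfold Spec_tags_since_vbd; infer_instance

-- ===== CLAIM (what is proved, stated in full; the proofs are below) =====
def Claim_equal_tags_since_vbd : Prop := ∀ (sentence : List (String × String)) (i : Int), Dom_tags_since_vbd sentence i → Spec_tags_since_vbd sentence i (tags_since_vbd sentence i)

-- ===== LEMMAS AND PROOFS =====

-- the tags strictly before the first "VBD" of a list
def tsvPref : List (String × String) → List String
  | [] => []
  | wp :: rest => if wp.2 == "VBD" then [] else wp.2 :: tsvPref rest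

theorem mem_tsvBack (l : List (String × String)) (t : PySem.Set String) (x : String) :
    x ∈ tsvBack l t ↔ x ∈ t ∨ x ∈ tsvPref l := by
  induction l generalizing t with
  | nil => simp [tsvBack, tsvPref]
  | cons wp rest ih =>
    by_cases h : wp.2 = "VBD"
    · simp [tsvBack, tsvPref, h]
    · simp only [tsvBack, tsvPref, beq_iff_eq, h, if_false, ih, PySem.Set.mem_add, List.mem_cons]
      tauto

theorem nodup_tsvBack (l : List (String × String)) (t : PySem.Set String) (ht : t.Nodup) :
    (tsvBack l t).Nodup := by
  induction l generalizing t with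
  | nil => simpa [tsvBack]
  | cons wp rest ih =>
    by_cases h : wp.2 = "VBD"
    · simpa [tsvBack, h]
    · simp only [tsvBack, beq_iff_eq, h, if_false]
      exact ih _ (PySem.Set.nodup_add _ _ ht)

def tsvStep : PySem.Set String → (String × String) → PySem.Set String :=
  fun tags wp => if wp.2 == "VBD" then PySem.Set.empty else PySem.Set.add tags wp.2

theorem mem_foldA (l : List (String × String)) (s : PySem.Set String) (x : String) :
    x ∈ l.foldl tsvStep s ↔
      x ∈ tsvPref l.reverse ∨ ((l.all (fun wp => !(wp.2 == "VBD"))) = true ∧ x ∈ s) := by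
  induction l using List.reverseRecOn generalizing s with
  | nil => simp [tsvPref]
  | append_singleton l wp ih =>
    rw [List.foldl_append]
    by_cases h : wp.2 = "VBD"
    · simp [tsvStep, tsvPref, h, PySem.Set.empty]
    · simp only [List.reverse_append, List.reverse_singleton, List.singleton_append,
        tsvPref, tsvStep, List.foldl_cons, List.foldl_nil, beq_iff_eq, h, if_false,
        List.all_append, List.all_cons, List.all_nil, Bool.and_true,
        PySem.Set.mem_add, List.mem_cons]
      rw [ih]
      have hb : (!(wp.2 == "VBD")) = true := by simp [h]
      rw [Bool.and_eq_true, hb]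
      tauto

theorem nodup_foldA (l : List (String × String)) (s : PySem.Set String) (hs : s.Nodup) :
    (l.foldl tsvStep s).Nodup := by
  induction l generalizing s with
  | nil => simpa
  | cons wp rest ih =>
    simp only [List.foldl_cons]
    by_cases h : wp.2 = "VBD"
    · exact ih _ (by simp [tsvStep, h, PySem.Set.empty])
    · exact ih _ (by simpa [tsvStep, h] using PySem.Set.nodup_add _ _ hs)

-- ===== VERDICT (by name: the statement is the Claim_ definition above) =====
theorem tags_since_vbd_spec : Claim_equal_tags_since_vbd := by
  intro sentence i _
  unfold Spec_tags_since_vbd tags_since_vbd tags_since_vbd_alt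
  set l := PySem.List.slice sentence none (some i) with hl
  have hperm : (l.foldl tsvStep PySem.Set.empty).Perm (tsvBack l.reverse PySem.Set.empty) := by
    rw [List.perm_ext_iff_of_nodup
      (nodup_foldA l _ (by simp [PySem.Set.empty]))
      (nodup_tsvBack _ _ (by simp [PySem.Set.empty]))]
    intro x
    rw [mem_foldA, mem_tsvBack]
    simp [PySem.Set.empty]
  have : PySem.List.sorted (l.foldl tsvStep PySem.Set.empty) (fun x => x) false
       = PySem.List.sorted (tsvBack l.reverse PySem.Set.empty) (fun x => x) false :=
    PySem.List.sorted_eq_sorted_of_perm _ _ _ (fun _ _ h => h) hperm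
  exact congrArg (PySem.Str.join "+") this
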